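-- pv_equiv track=rewrite | github.com/caioseda/MedSegDiff | scripts/plot_progress.py | pick_known_groups
-- ===== SOURCE A (Python) =====
-- from typing import Dict, Iterable, List, Optional, Tuple
--
-- def pick_known_groups(groups: Dict[str, Dict[str, str]]) -> List[Tuple[str, Dict[str, str]]]:
--     preferred_order = [
--         "loss",
--         "loss_cal",
--         "loss_diff",
--         "vb",
--     ]
--     ordered: List[Tuple[str, Dict[str, str]]] = []
--     for name in preferred_order:
--         if name in groups:
--             ordered.append((name, groups[name]))
--     # Append any other groups that look like metrics (exclude obvious axes)
--     for key, spec in groups.items():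
--         if key in preferred_order:
--             continue
--         if key in {"step", "steps", "samples", "epoch", "iteration", "iter"}:
--             continue
--         if key.endswith("_q0") or key.endswith("_q1") or key.endswith("_q2") or key.endswith("_q3"):
--             continue
--         # Avoid plotting clearly redundant scalar-only helpers like param_norm together here
--         ordered.append((key, spec))
--     return ordered
-- ===== SOURCE B (Python) =====
-- def pick_known_groups(groups):
--     preferred_order = ["loss", "loss_cal", "loss_diff", "vb"]
--     axes = {"step", "steps", "samples", "epoch", "iteration", "iter"}
--
--     def rank(key):
--         return preferred_order.index(key) if key in preferred_order else len(preferred_order)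
--
--     kept = [(key, spec) for key, spec in groups.items()
--             if key in preferred_order
--             or (key not in axes and not key.endswith(("_q0", "_q1", "_q2", "_q3")))]
--     return sorted(kept, key=lambda kv: rank(kv[0]))
-- ===== Notes on version B (the rewrite author's own statement) =====
-- stated objective: idiomatic
-- what changed: B replaces A's two shaped passes (a preferred-order lookup loop, then a filtering loop) by one filtered comprehension over the items followed by a stable sort under a rank key (preferred_order.index or a sentinel), relying on sort stability for the tail's dict order.
import Mathlib
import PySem

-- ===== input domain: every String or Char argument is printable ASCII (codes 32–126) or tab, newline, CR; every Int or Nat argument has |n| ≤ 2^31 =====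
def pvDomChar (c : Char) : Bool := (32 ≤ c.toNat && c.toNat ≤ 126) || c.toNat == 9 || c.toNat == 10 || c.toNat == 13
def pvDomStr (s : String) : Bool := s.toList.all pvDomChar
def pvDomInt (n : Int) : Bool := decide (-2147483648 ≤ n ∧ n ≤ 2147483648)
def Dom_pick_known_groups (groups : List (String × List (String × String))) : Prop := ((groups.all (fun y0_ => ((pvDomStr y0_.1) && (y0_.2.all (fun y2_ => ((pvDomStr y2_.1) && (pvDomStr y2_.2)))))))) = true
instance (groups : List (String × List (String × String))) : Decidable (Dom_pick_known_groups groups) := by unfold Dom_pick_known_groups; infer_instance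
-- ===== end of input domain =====

-- B replaces A's two shaped passes (preferred-order lookups, then a filtering loop) by one
-- filtered pass over the items plus ONE stable sort under a rank key (objective: idiomatic).

-- ===== PORT A =====
-- shared literal constants/predicates of the Python source (used by both ports)
def pkgPreferred : List String := ["loss", "loss_cal", "loss_diff", "vb"]
def pkgIsAxis (k : String) : Bool :=
  k == "step" || k == "steps" || k == "samples" || k == "epoch" || k == "iteration" || k == "iter"
def pkgIsQuant (k : String) : Bool :=
  PySem.Str.endswith k "_q0" || PySem.Str.endswith k "_q1" ||
  PySem.Str.endswith k "_q2" || PySem.Str.endswith k "_q3"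

-- A: first loop over preferred_order ('name in groups' guard, then groups[name], here
-- expressed via get? under the contains guard), then a loop over groups.items() with the
-- three 'continue' branches in source order.
def pick_known_groups (groups : List (String × List (String × String))) : List (String × (List (String × String))) :=
  let d := PySem.Dict.ofList groups
  let ordered := pkgPreferred.foldl (fun acc name =>
    if d.contains name then acc ++ [(name, (d.get? name).getD [])] else acc) []
  d.items.foldl (fun acc kv =>
    if pkgPreferred.contains kv.1 then acc
    else if pkgIsAxis kv.1 then acc
    else if pkgIsQuant kv.1 then acc
    else acc ++ [kv]) ordered

-- ===== PORT B =====
-- B's rank key: preferred_order.index(key) if key in preferred_order else len(preferred_order)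
def pkgRank (k : String) : Int :=
  if pkgPreferred.contains k then (((PySem.List.index? pkgPreferred k).getD 0 : Nat) : Int)
  else (pkgPreferred.length : Int)

-- B's comprehension filter: key in preferred_order or (key not an axis and no _q{0..3} suffix)
def pkgKeep (kv : String × List (String × String)) : Bool :=
  pkgPreferred.contains kv.1 || (!pkgIsAxis kv.1 && !pkgIsQuant kv.1)

-- B: one filtered pass over the items, then sorted(kept, key=rank) (stable)
def pick_known_groups_alt (groups : List (String × List (String × String))) : List (String × (List (String × String))) :=
  let kept := (PySem.Dict.ofList groups).items.filter pkgKeep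
  PySem.List.sorted kept (fun kv => pkgRank kv.1) false

-- ===== PRECONDITION & SPEC =====
def Spec_pick_known_groups (groups : List (String × List (String × String))) (out : List (String × (List (String × String)))) : Prop := out = pick_known_groups_alt groups
instance (groups : List (String × List (String × String))) (out : List (String × (List (String × String)))) : Decidable (Spec_pick_known_groups groups out) := by unfold Spec_pick_known_groups; infer_instance

-- ===== CLAIM (what is proved, stated in full; the proofs are below) =====
def Claim_equal_pick_known_groups : Prop := ∀ (groups : List (String × List (String × String))), Dom_pick_known_groups groups → Spec_pick_known_groups groups (pick_known_groups groups)

-- ===== LEMMAS AND PROOFS =====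

-- pkgRank in closed form (evaluating preferred_order.index on the four literal names)
lemma pkgRank_eq (k : String) :
    pkgRank k = if k = "loss" then 0 else if k = "loss_cal" then 1
      else if k = "loss_diff" then 2 else if k = "vb" then 3 else 4 := by
  by_cases h0 : k = "loss"
  · subst h0; decide
  by_cases h1 : k = "loss_cal"
  · subst h1; decide
  by_cases h2 : k = "loss_diff"
  · subst h2; decide
  by_cases h3 : k = "vb"
  · subst h3; decide
  simp [pkgRank, h0, h1, h2, h3, pkgPreferred]

-- stable-insert skips a prefix it is not "before"
lemma insertBy_skip {α : Type} (before : α → α → Bool) (x : α) (A B : List α)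
    (h : ∀ y ∈ A, before x y = false) :
    PySem.List.insertBy before x (A ++ B) = A ++ PySem.List.insertBy before x B := by
  induction A with
  | nil => simp
  | cons a A ih =>
    have ha : before x a = false := h a (by simp)
    simp only [List.cons_append, PySem.List.insertBy, ha]
    simp [ih (fun y hy => h y (by simp [hy]))]

-- stable-insert goes in front of a block it is entirely "before"
lemma insertBy_front {α : Type} (before : α → α → Bool) (x : α) (B : List α)
    (h : ∀ y ∈ B, before x y = true) :
    PySem.List.insertBy before x B = x :: B := by
  cases B with
  | nil => rfl
  | cons b B => simp [PySem.List.insertBy, h b (by simp)]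

-- the five rank buckets of a list, in rank order
def pkgBkt (i : Int) (l : List (String × List (String × String))) : List (String × List (String × String)) :=
  l.filter (fun kv => pkgRank kv.1 == i)
def pkgBkts (l : List (String × List (String × String))) : List (String × List (String × String)) :=
  pkgBkt 0 l ++ pkgBkt 1 l ++ pkgBkt 2 l ++ pkgBkt 3 l ++ pkgBkt 4 l

lemma mem_pkgBkt {i : Int} {l : List (String × List (String × String))} {y : String × List (String × String)}
    (h : y ∈ pkgBkt i l) : pkgRank y.1 = i := by
  have := (List.mem_filter.mp h).2
  simpa using this

lemma pkgRank_mem_range (k : String) :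
    pkgRank k = 0 ∨ pkgRank k = 1 ∨ pkgRank k = 2 ∨ pkgRank k = 3 ∨ pkgRank k = 4 := by
  rw [pkgRank_eq]; split_ifs <;> simp

lemma pkgBkt_append_singleton (i : Int) (l : List (String × List (String × String)))
    (x : String × List (String × String)) :
    pkgBkt i (l ++ [x]) = pkgBkt i l ++ (if pkgRank x.1 = i then [x] else []) := by
  simp only [pkgBkt, List.filter_append]
  congr 1
  by_cases h : pkgRank x.1 = i <;> simp [h]

-- one stable insert preserves the bucket decomposition
lemma pkgBkts_step (l : List (String × List (String × String))) (x : String × List (String × String)) :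
    PySem.List.insertBy (fun a b => decide (pkgRank a.1 < pkgRank b.1)) x (pkgBkts l)
      = pkgBkts (l ++ [x]) := by
  rcases pkgRank_mem_range x.1 with hr | hr | hr | hr | hr
  · -- rank 0: skip bucket 0, go in front of the rest
    have hA : ∀ y ∈ pkgBkt 0 l, (decide (pkgRank x.1 < pkgRank y.1)) = false := by
      intro y hy; have := mem_pkgBkt hy
      simp only [decide_eq_false_iff_not, not_lt]; omega
    have hB : ∀ y ∈ pkgBkt 1 l ++ (pkgBkt 2 l ++ (pkgBkt 3 l ++ pkgBkt 4 l)),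
        (decide (pkgRank x.1 < pkgRank y.1)) = true := by
      intro y hy; simp only [List.mem_append] at hy
      rcases hy with h | h | h | h <;> (have := mem_pkgBkt h; simp only [decide_eq_true_eq]; omega)
    have hsplit : pkgBkts l
        = pkgBkt 0 l ++ (pkgBkt 1 l ++ (pkgBkt 2 l ++ (pkgBkt 3 l ++ pkgBkt 4 l))) := by
      simp [pkgBkts]
    rw [hsplit, insertBy_skip _ _ _ _ hA, insertBy_front _ _ _ hB]
    simp [pkgBkts, pkgBkt_append_singleton, hr]
  · have hA : ∀ y ∈ pkgBkt 0 l ++ pkgBkt 1 l, (decide (pkgRank x.1 < pkgRank y.1)) = false := by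
      intro y hy; simp only [List.mem_append] at hy
      rcases hy with h | h <;> (have := mem_pkgBkt h; simp only [decide_eq_false_iff_not, not_lt]; omega)
    have hB : ∀ y ∈ pkgBkt 2 l ++ (pkgBkt 3 l ++ pkgBkt 4 l),
        (decide (pkgRank x.1 < pkgRank y.1)) = true := by
      intro y hy; simp only [List.mem_append] at hy
      rcases hy with h | h | h <;> (have := mem_pkgBkt h; simp only [decide_eq_true_eq]; omega)
    have hsplit : pkgBkts l
        = (pkgBkt 0 l ++ pkgBkt 1 l) ++ (pkgBkt 2 l ++ (pkgBkt 3 l ++ pkgBkt 4 l)) := by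
      simp [pkgBkts]
    rw [hsplit, insertBy_skip _ _ _ _ hA, insertBy_front _ _ _ hB]
    simp [pkgBkts, pkgBkt_append_singleton, hr]
  · have hA : ∀ y ∈ pkgBkt 0 l ++ (pkgBkt 1 l ++ pkgBkt 2 l),
        (decide (pkgRank x.1 < pkgRank y.1)) = false := by
      intro y hy; simp only [List.mem_append] at hy
      rcases hy with h | h | h <;> (have := mem_pkgBkt h; simp only [decide_eq_false_iff_not, not_lt]; omega)
    have hB : ∀ y ∈ pkgBkt 3 l ++ pkgBkt 4 l, (decide (pkgRank x.1 < pkgRank y.1)) = true := by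
      intro y hy; simp only [List.mem_append] at hy
      rcases hy with h | h <;> (have := mem_pkgBkt h; simp only [decide_eq_true_eq]; omega)
    have hsplit : pkgBkts l
        = (pkgBkt 0 l ++ (pkgBkt 1 l ++ pkgBkt 2 l)) ++ (pkgBkt 3 l ++ pkgBkt 4 l) := by
      simp [pkgBkts]
    rw [hsplit, insertBy_skip _ _ _ _ hA, insertBy_front _ _ _ hB]
    simp [pkgBkts, pkgBkt_append_singleton, hr]
  · have hA : ∀ y ∈ pkgBkt 0 l ++ (pkgBkt 1 l ++ (pkgBkt 2 l ++ pkgBkt 3 l)),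
        (decide (pkgRank x.1 < pkgRank y.1)) = false := by
      intro y hy; simp only [List.mem_append] at hy
      rcases hy with h | h | h | h <;> (have := mem_pkgBkt h; simp only [decide_eq_false_iff_not, not_lt]; omega)
    have hB : ∀ y ∈ pkgBkt 4 l, (decide (pkgRank x.1 < pkgRank y.1)) = true := by
      intro y hy; have := mem_pkgBkt hy; simp only [decide_eq_true_eq]; omega
    have hsplit : pkgBkts l
        = (pkgBkt 0 l ++ (pkgBkt 1 l ++ (pkgBkt 2 l ++ pkgBkt 3 l))) ++ pkgBkt 4 l := by
      simp [pkgBkts]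
    rw [hsplit, insertBy_skip _ _ _ _ hA, insertBy_front _ _ _ hB]
    simp [pkgBkts, pkgBkt_append_singleton, hr]
  · -- rank 4: appended at the very end
    have hA : ∀ y ∈ pkgBkts l, (decide (pkgRank x.1 < pkgRank y.1)) = false := by
      intro y hy
      simp only [pkgBkts, List.mem_append] at hy
      rcases hy with (((h | h) | h) | h) | h <;>
        (have := mem_pkgBkt h; simp only [decide_eq_false_iff_not, not_lt]; omega)
    rw [PySem.List.insertBy_of_forall_not_before _ _ _ hA]
    simp [pkgBkts, pkgBkt_append_singleton, hr]

-- B's stable sort IS the concatenation of the five rank buckets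
lemma sorted_eq_pkgBkts (l : List (String × List (String × String))) :
    PySem.List.sorted l (fun kv => pkgRank kv.1) false = pkgBkts l := by
  rw [PySem.List.sorted_eq_foldl_insertBy]
  induction l using List.reverseRecOn with
  | nil => rfl
  | append_singleton l x ih =>
    rw [List.foldl_append, List.foldl_cons, List.foldl_nil, ih, pkgBkts_step]

-- dict lookup is the first match in the items list
lemma dict_get?_eq_find (d : PySem.Dict String (List (String × String))) (n : String) :
    d.get? n = (d.items.find? (fun kv => kv.1 == n)).map (·.2) := by
  obtain ⟨l⟩ := d
  induction l with
  | nil => rfl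
  | cons p l ih =>
    rw [show (PySem.Dict.mk (p :: l)).items = p :: l from rfl, PySem.Dict.get?_mk_cons]
    by_cases h : p.1 = n
    · rw [List.find?_cons_of_pos (by simp [h])]; simp [h]
    · rw [List.find?_cons_of_neg (by simp [h])]; simp [h, ih]

-- with unique keys, filtering the items by a key is the (at most one) first match
lemma filter_fst_nodup (l : List (String × List (String × String)))
    (hnd : (l.map Prod.fst).Nodup) (n : String) :
    l.filter (fun kv => kv.1 == n) = (l.find? (fun kv => kv.1 == n)).toList := by
  induction l with
  | nil => rfl
  | cons p l ih =>
    simp only [List.map_cons, List.nodup_cons] at hnd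
    by_cases h : p.1 = n
    · have hnone : l.filter (fun kv => kv.1 == n) = [] := by
        rw [List.filter_eq_nil_iff]
        intro q hq hqn
        exact hnd.1 (by simpa [h, (by simpa using hqn : q.1 = n)] using List.mem_map_of_mem (f := Prod.fst) hq)
      rw [List.filter_cons, List.find?_cons_of_pos (by simp [h])]
      simp [h, hnone]
    · rw [List.filter_cons, List.find?_cons_of_neg (by simp [h])]
      simp [h, ih hnd.2]

lemma items_filter_key (d : PySem.Dict String (List (String × String)))
    (hnd : (d.items.map Prod.fst).Nodup) (n : String) :
    d.items.filter (fun kv => kv.1 == n) = ((d.get? n).map (fun v => (n, v))).toList := by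
  rw [filter_fst_nodup _ hnd n, dict_get?_eq_find]
  cases hf : d.items.find? (fun kv => kv.1 == n) with
  | none => simp
  | some q =>
    have hq : q.1 = n := by simpa using List.find?_some hf
    simp [← hq]

-- A's first loop is the filtered comprehension over the same lookups
lemma pkg_pref_foldl (P : List String) (d : PySem.Dict String (List (String × String)))
    (acc : List (String × List (String × String))) :
    P.foldl (fun acc name =>
        if d.contains name then acc ++ [(name, (d.get? name).getD [])] else acc) acc
      = acc ++ P.filterMap (fun n => (d.get? n).map (fun v => (n, v))) := by
  induction P generalizing acc with
  | nil => simp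
  | cons n P ih =>
    simp only [List.foldl_cons, List.filterMap_cons]
    cases hg : d.get? n with
    | none =>
      have hc : d.contains n = false := (PySem.Dict.get?_eq_none_iff_contains d n).mp hg
      simp [hc, ih]
    | some v =>
      have hc : d.contains n = true := by
        rw [PySem.Dict.contains_eq_isSome_get?, hg]; rfl
      simp [hc, ih]

-- A's second loop in the canonical append-if shape
lemma pkg_second_loop (l : List (String × List (String × String)))
    (acc : List (String × List (String × String))) :
    l.foldl (fun acc kv =>
        if pkgPreferred.contains kv.1 then acc
        else if pkgIsAxis kv.1 then acc
        else if pkgIsQuant kv.1 then acc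
        else acc ++ [kv]) acc
      = acc ++ l.filter (fun kv => !pkgPreferred.contains kv.1 && !pkgIsAxis kv.1 && !pkgIsQuant kv.1) := by
  have hfun : (fun (acc : List (String × List (String × String))) kv =>
        if pkgPreferred.contains kv.1 then acc
        else if pkgIsAxis kv.1 then acc
        else if pkgIsQuant kv.1 then acc
        else acc ++ [kv])
      = (fun acc kv =>
        if (!pkgPreferred.contains kv.1 && !pkgIsAxis kv.1 && !pkgIsQuant kv.1) then acc ++ [id kv] else acc) := by
    funext acc kv
    cases hp : pkgPreferred.contains kv.1 <;>
      cases ha : pkgIsAxis kv.1 <;>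
        cases hq : pkgIsQuant kv.1 <;> simp
  rw [hfun, PySem.List.foldl_append_if]
  simp

-- filterMap over the literal four-name list, as four option-blocks
lemma pkg_filterMap_pref (f : String → Option (String × List (String × String))) :
    pkgPreferred.filterMap f
      = (f "loss").toList ++ (f "loss_cal").toList ++ (f "loss_diff").toList ++ (f "vb").toList := by
  cases h0 : f "loss" <;> cases h1 : f "loss_cal" <;> cases h2 : f "loss_diff" <;> cases h3 : f "vb" <;>
    simp [pkgPreferred, h0, h1, h2, h3]

-- the first four buckets of the kept items are the single preferred matches
lemma pkgBkt_pref (items : List (String × List (String × String))) (n : String) (i : Int)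
    (hpt : ∀ k : String, pkgRank k = i ↔ k = n) (hcont : pkgPreferred.contains n = true) :
    pkgBkt i (items.filter pkgKeep) = items.filter (fun kv => kv.1 == n) := by
  rw [pkgBkt, List.filter_filter]
  apply List.filter_congr
  intro kv _
  by_cases h : kv.1 = n
  · have hm : n ∈ pkgPreferred := by simpa using hcont
    simp [h, (hpt n).mpr rfl, pkgKeep, hm]
  · have hb1 : (pkgRank kv.1 == i) = false := by
      simpa using fun hc => h ((hpt _).mp hc)
    have hb2 : (kv.1 == n) = false := by simpa using h
    simp [hb1, hb2]

-- the last bucket of the kept items is A's tail filter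
lemma pkgBkt_tail (items : List (String × List (String × String))) :
    pkgBkt 4 (items.filter pkgKeep)
      = items.filter (fun kv => !pkgPreferred.contains kv.1 && !pkgIsAxis kv.1 && !pkgIsQuant kv.1) := by
  rw [pkgBkt, List.filter_filter]
  apply List.filter_congr
  intro kv _
  by_cases hc : pkgPreferred.contains kv.1
  · have hm : kv.1 ∈ pkgPreferred := by simpa using hc
    have hm' : kv.1 = "loss" ∨ kv.1 = "loss_cal" ∨ kv.1 = "loss_diff" ∨ kv.1 = "vb" := by
      simpa [pkgPreferred] using hm
    have hne : pkgRank kv.1 ≠ 4 := by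
      rw [pkgRank_eq]; rcases hm' with h | h | h | h <;> simp [h]
    simp [hne, hm]
  · have hm : kv.1 ∉ pkgPreferred := by simpa using hc
    have hfour : pkgRank kv.1 = 4 := by
      rw [pkgRank_eq]
      have hm' : ¬ (kv.1 = "loss" ∨ kv.1 = "loss_cal" ∨ kv.1 = "loss_diff" ∨ kv.1 = "vb") := by
        simpa [pkgPreferred] using hm
      push Not at hm'
      simp [hm'.1, hm'.2.1, hm'.2.2.1, hm'.2.2.2]
    simp [hfour, pkgKeep, hm]

-- ===== VERDICT (by name: the statement is the Claim_ definition above) =====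
theorem pick_known_groups_spec : Claim_equal_pick_known_groups := by
  intro groups _
  unfold Spec_pick_known_groups pick_known_groups pick_known_groups_alt
  dsimp only
  set d := PySem.Dict.ofList groups with hd
  have hnd : (d.items.map Prod.fst).Nodup := by
    have := PySem.Dict.nodup_keys_ofList groups
    simpa [PySem.Dict.keys, hd] using this
  have hpt0 : ∀ k : String, pkgRank k = 0 ↔ k = "loss" := by
    intro k; rw [pkgRank_eq]; split_ifs <;> simp_all
  have hpt1 : ∀ k : String, pkgRank k = 1 ↔ k = "loss_cal" := by
    intro k; rw [pkgRank_eq]; split_ifs <;> simp_all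
  have hpt2 : ∀ k : String, pkgRank k = 2 ↔ k = "loss_diff" := by
    intro k; rw [pkgRank_eq]; split_ifs <;> simp_all
  have hpt3 : ∀ k : String, pkgRank k = 3 ↔ k = "vb" := by
    intro k; rw [pkgRank_eq]; split_ifs <;> simp_all
  rw [pkg_second_loop, pkg_pref_foldl, sorted_eq_pkgBkts, pkg_filterMap_pref, pkgBkts,
      pkgBkt_pref d.items "loss" 0 hpt0 (by decide),
      pkgBkt_pref d.items "loss_cal" 1 hpt1 (by decide),
      pkgBkt_pref d.items "loss_diff" 2 hpt2 (by decide),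
      pkgBkt_pref d.items "vb" 3 hpt3 (by decide),
      pkgBkt_tail,
      items_filter_key d hnd "loss", items_filter_key d hnd "loss_cal",
      items_filter_key d hnd "loss_diff", items_filter_key d hnd "vb"]
  simp [List.append_assoc]
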